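-- pv_equiv track=rewrite | github.com/sixfunctors/ProjectEuler | 30-39/euler34.py | isCurious
-- ===== SOURCE A (Python) =====
-- from math import factorial
--
-- def isCurious(n):
--     sum = 0
--     for d in str(n):
--         sum += factorial(int(d))
--     if (sum == n):
--         return True
--     else:
--         return False
-- ===== SOURCE B (Python) =====
-- from math import factorial
--
-- def isCurious(n):
--     # Arithmetic digit extraction (do-while) instead of iterating over str(n):
--     # peel decimal digits by modulus and floor division by ten.
--     total = 0
--     m = n
--     while True:
--         total += factorial(m % 10)
--         m //= 10
--         if m == 0:
--             break
--     return total == n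
-- ===== Notes on version B (the rewrite author's own statement) =====
-- stated objective: alternative
-- what changed: Replaces string conversion and per-character int()+factorial over str(n) with an arithmetic do-while loop that extracts decimal digits by modulus and floor division by ten.
import Mathlib
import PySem

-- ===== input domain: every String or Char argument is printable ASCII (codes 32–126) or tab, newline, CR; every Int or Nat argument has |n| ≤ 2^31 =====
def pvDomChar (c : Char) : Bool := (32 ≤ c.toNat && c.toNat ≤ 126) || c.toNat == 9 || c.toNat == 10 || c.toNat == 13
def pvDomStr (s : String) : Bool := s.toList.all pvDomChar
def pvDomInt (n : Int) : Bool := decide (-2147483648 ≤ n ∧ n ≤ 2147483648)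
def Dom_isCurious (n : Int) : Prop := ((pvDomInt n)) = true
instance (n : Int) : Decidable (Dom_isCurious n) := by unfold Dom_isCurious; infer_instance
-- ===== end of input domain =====

-- B replaces A's per-character iteration over str(n) with an arithmetic do-while digit loop (modulus / floor division by ten); equal return value on all nonnegative inputs.

-- ===== PORT A =====
-- math.factorial(i); Python raises on i < 0, which Pre_ excludes (int(d) already raises there).
def pyFact (i : Int) : Int := (Nat.factorial i.toNat : Int)

-- for d in str(n): sum += factorial(int(d));  int(d) raises ValueError on '-' (n < 0), excluded by Pre_.
def isCurious (n : Int) : Bool :=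
  let sum := (PySem.Int.toChars n).foldl
    (fun acc d => acc + pyFact ((PySem.Int.ofChars? [d]).getD 0)) 0
  decide (sum = n)

-- ===== PORT B =====
-- the while True: total += factorial(m % 10); m //= 10; if m == 0: break — fuel only guards totality
def altLoop : Nat → Int → Int → Int
  | 0, total, _ => total
  | Nat.succ fuel, total, m =>
    let total' := total + pyFact (PySem.Int.mod m 10)
    let m' := PySem.Int.floordiv m 10
    if m' = 0 then total' else altLoop fuel total' m'

def isCurious_alt (n : Int) : Bool :=
  decide (altLoop (n.natAbs + 1) 0 n = n)

-- ===== PRECONDITION & SPEC =====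
-- Pre_ excludes negative inputs, where A raises ValueError (int of the minus sign).
def Pre_isCurious (n : Int) : Prop := 0 ≤ n
instance (n : Int) : Decidable (Pre_isCurious n) := by unfold Pre_isCurious; infer_instance
def pvWitness_isCurious : Int := (145)

def Spec_isCurious (n : Int) (out : Bool) : Prop := out = isCurious_alt n
instance (n : Int) (out : Bool) : Decidable (Spec_isCurious n out) := by unfold Spec_isCurious; infer_instance

-- ===== CLAIM (what is proved, stated in full; the proofs are below) =====
def Claim_equal_isCurious : Prop := ∀ (n : Int), Dom_isCurious n → Pre_isCurious n → Spec_isCurious n (isCurious n)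

-- ===== LEMMAS AND PROOFS =====

-- the common digit-factorial sum both programs accumulate
def digFactSum (k : Nat) : Int := ((Nat.digits 10 k).map (fun d => (Nat.factorial d : Int))).sum

lemma toDigitsCore_eq (f : Nat) : ∀ (k : Nat) (acc : List Char), 0 < k → k < f →
    Nat.toDigitsCore 10 f k acc = ((Nat.digits 10 k).map Nat.digitChar).reverse ++ acc := by
  induction f with
  | zero => intro k acc h hf; omega
  | succ f ih =>
    intro k acc hk hf
    rw [Nat.toDigitsCore]
    rw [Nat.digits_def' (by norm_num : 1 < 10) hk]
    by_cases h10 : k / 10 = 0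
    · simp [h10]
    · simp only [h10, if_false]
      rw [ih (k / 10) _ (Nat.pos_of_ne_zero h10) (by omega)]
      simp

lemma fact_digitChar (d : Nat) (hd : d < 10) :
    pyFact ((PySem.Int.ofChars? [Nat.digitChar d]).getD 0) = (Nat.factorial d : Int) := by
  interval_cases d <;> decide

lemma isCurious_sum (k : Nat) :
    (PySem.Int.toChars (k : Int)).foldl
      (fun acc d => acc + pyFact ((PySem.Int.ofChars? [d]).getD 0)) 0
    = if k = 0 then 1 else digFactSum k := by
  rw [PySem.List.foldl_add]
  by_cases hk : k = 0
  · subst hk; decide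
  · simp only [hk, if_false]
    have : PySem.Int.toChars (k : Int) = ((Nat.digits 10 k).map Nat.digitChar).reverse := by
      simp only [PySem.Int.toChars]
      rw [if_neg (by omega)]
      have : (k : Int).toNat = k := Int.toNat_natCast k
      rw [this, Nat.toDigits, toDigitsCore_eq (k + 1) k [] (Nat.pos_of_ne_zero hk) (by omega)]
      simp
    rw [this, List.map_reverse, List.sum_reverse, digFactSum, zero_add,
        ← List.comp_map]
    congr 1
    apply List.map_congr_left
    intro d hd
    exact fact_digitChar d (Nat.digits_lt_base (by norm_num) hd)

lemma altLoop_eq (f : Nat) : ∀ (k : Nat) (total : Int), k < f →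
    altLoop f total (k : Int) = total + (if k = 0 then 1 else digFactSum k) := by
  induction f with
  | zero => intro k total h; omega
  | succ f ih =>
    intro k total hk
    show (if PySem.Int.floordiv (k : Int) 10 = 0 then total + pyFact (PySem.Int.mod (k : Int) 10)
          else altLoop f (total + pyFact (PySem.Int.mod (k : Int) 10)) (PySem.Int.floordiv (k : Int) 10))
        = total + (if k = 0 then 1 else digFactSum k)
    have hm : PySem.Int.mod (k : Int) 10 = ((k % 10 : Nat) : Int) := by
      exact_mod_cast PySem.Int.mod_natCast k 10
    have hd : PySem.Int.floordiv (k : Int) 10 = ((k / 10 : Nat) : Int) := by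
      exact_mod_cast PySem.Int.floordiv_natCast k 10
    rw [hm, hd]
    by_cases h10 : k / 10 = 0
    · have hlt : k < 10 := (Nat.div_eq_zero_iff_lt (by norm_num)).mp h10
      rw [h10]
      simp only [Nat.cast_zero, if_true, pyFact]
      by_cases hk0 : k = 0
      · subst hk0; norm_num [Nat.factorial]
      · rw [if_neg hk0, digFactSum, Nat.digits_of_lt 10 k (by omega) hlt]
        simp [Nat.mod_eq_of_lt hlt, Int.toNat_natCast]
    · have hstep : digFactSum k = ((k % 10).factorial : Int) + digFactSum (k / 10) := by
        rw [digFactSum, Nat.digits_def' (by norm_num : 1 < 10) (by omega)]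
        simp [digFactSum]
      rw [if_neg (by exact_mod_cast h10), ih (k / 10) _ (by omega),
          if_neg h10, if_neg (by omega), hstep]
      simp only [pyFact, Int.toNat_natCast]
      ring

-- ===== VERDICT (by name: the statement is the Claim_ definition above) =====
theorem isCurious_spec : Claim_equal_isCurious := by
  intro n _ hpre
  unfold Spec_isCurious isCurious isCurious_alt
  obtain ⟨k, rfl⟩ := Int.eq_ofNat_of_zero_le hpre
  simp only [isCurious_sum k]
  rw [show ((k : Int).natAbs + 1) = k + 1 by simp, altLoop_eq (k + 1) k 0 (by omega), zero_add]
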